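-- pv_equiv track=rewrite | github.com/posl/comment_recommendation | script/split_gen/2_time/zh/209_B/4.py | buy_product
-- ===== SOURCE A (Python) =====
-- def buy_product(N, X, A):
--     for i in range(N):
--         if i % 2 == 0:
--             X -= A[i]
--         else:
--             X -= A[i] - 1
--     if X >= 0:
--         return "Yes"
--     else:
--         return "No"
-- ===== SOURCE B (Python) =====
-- def buy_product(N, X, A):
--     # Stride-2 pairing: each full pair (A[i], A[i+1]) costs A[i] + A[i+1] - 1
--     # (the second of a pair is always at an odd index), a trailing lone
--     # element costs its full price. No per-element parity test needed.
--     i = 0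
--     while i + 1 < N:
--         X -= A[i] + A[i + 1] - 1
--         i += 2
--     if i < N:
--         X -= A[i]
--     return "Yes" if X >= 0 else "No"
-- ===== Notes on version B (the rewrite author's own statement) =====
-- stated objective: alternative
-- what changed: Walks the first N elements in stride-2 pairs, subtracting a+b-1 per full pair and the bare price for a trailing lone element, instead of A's per-index even/odd branch inside a range(N) loop.
import Mathlib
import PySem

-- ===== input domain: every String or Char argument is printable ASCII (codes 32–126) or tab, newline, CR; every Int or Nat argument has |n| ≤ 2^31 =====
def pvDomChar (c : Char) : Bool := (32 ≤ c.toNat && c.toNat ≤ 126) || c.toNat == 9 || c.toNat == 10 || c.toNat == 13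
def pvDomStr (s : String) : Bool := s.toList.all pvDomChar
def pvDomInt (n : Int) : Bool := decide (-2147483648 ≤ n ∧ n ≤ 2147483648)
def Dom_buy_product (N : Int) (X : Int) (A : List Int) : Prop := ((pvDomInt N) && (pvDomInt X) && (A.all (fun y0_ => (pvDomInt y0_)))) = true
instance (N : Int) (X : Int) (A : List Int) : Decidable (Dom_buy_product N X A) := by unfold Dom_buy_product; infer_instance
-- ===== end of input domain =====

-- ===== PORT A =====
-- B replaces A's per-index even/odd branching loop by a stride-2 pair walk (objective: alternative).
def buy_product (N : Int) (X : Int) (A : List Int) : String :=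
  if (PySem.List.pyRange 0 N 1).foldl
      (fun x i =>
        if PySem.Int.mod i 2 = 0 then x - PySem.List.pyGetD A i 0
        else x - (PySem.List.pyGetD A i 0 - 1)) X >= 0
  then "Yes" else "No"

-- ===== PORT B =====
-- the while loop of Source B: consume full pairs (A[i], A[i+1]) while i+1 < N, then a possible lone element
def buyPairs (N : Int) (A : List Int) (i : Int) (x : Int) : Int :=
  if i + 1 < N then
    buyPairs N A (i + 2) (x - (PySem.List.pyGetD A i 0 + PySem.List.pyGetD A (i + 1) 0 - 1))
  else if i < N then x - PySem.List.pyGetD A i 0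
  else x
termination_by (N - i).toNat
decreasing_by omega

def buy_product_alt (N : Int) (X : Int) (A : List Int) : String :=
  if buyPairs N A 0 X >= 0 then "Yes" else "No"

-- ===== PRECONDITION & SPEC =====
-- Pre_ excludes exactly the inputs where Python A raises IndexError (an index i < N beyond A's length).
def Pre_buy_product (N : Int) (X : Int) (A : List Int) : Prop := N <= (A.length : Int)
instance (N : Int) (X : Int) (A : List Int) : Decidable (Pre_buy_product N X A) := by unfold Pre_buy_product; infer_instance
def pvWitness_buy_product : Int × Int × List Int := (3, 5, [1, 2, 3])
def Spec_buy_product (N : Int) (X : Int) (A : List Int) (out : String) : Prop := out = buy_product_alt N X A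
instance (N : Int) (X : Int) (A : List Int) (out : String) : Decidable (Spec_buy_product N X A out) := by unfold Spec_buy_product; infer_instance

-- ===== CLAIM (what is proved, stated in full; the proofs are below) =====
def Claim_equal_buy_product : Prop := ∀ (N : Int) (X : Int) (A : List Int), Dom_buy_product N X A → Pre_buy_product N X A → Spec_buy_product N X A (buy_product N X A)

-- ===== LEMMAS AND PROOFS =====

-- A's fold in closed form: start minus the sum plus the number of odd elements of l.
theorem foldA_closed (A : List Int) (l : List Int) (x : Int) :
    l.foldl (fun x i =>
      if PySem.Int.mod i 2 = 0 then x - PySem.List.pyGetD A i 0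
      else x - (PySem.List.pyGetD A i 0 - 1)) x
    = x - (l.map (fun i => PySem.List.pyGetD A i 0)).sum
        + (l.countP (fun i => ¬ PySem.Int.mod i 2 = 0) : Int) := by
  induction l generalizing x with
  | nil => simp
  | cons h t ih =>
    simp only [List.foldl_cons, List.map_cons, List.sum_cons, List.countP_cons, ih]
    by_cases hm : PySem.Int.mod h 2 = 0
    · have hd : (decide ¬ PySem.Int.mod h 2 = 0) = false := by rw [hm]; decide
      rw [if_pos hm, hd, if_neg Bool.false_ne_true]
      push_cast
      ring
    · have hd : (decide ¬ PySem.Int.mod h 2 = 0) = true := decide_eq_true hm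
      rw [if_neg hm, hd, if_pos rfl]
      push_cast
      ring

-- Count of odd numbers among 0, …, n-1 is n / 2.
theorem countOdd_range (n : Nat) :
    (List.range n).countP (fun k => ¬ PySem.Int.mod ((k : Nat) : Int) 2 = 0) = n / 2 := by
  induction n with
  | zero => simp
  | succ m ih =>
    rw [List.range_succ, List.countP_append, List.countP_singleton, ih]
    have hmod : PySem.Int.mod ((m : Nat) : Int) 2 = ((m % 2 : Nat) : Int) := by
      exact_mod_cast PySem.Int.mod_natCast m 2
    by_cases hp : m % 2 = 0
    · have hd : (decide ¬ PySem.Int.mod ((m : Nat) : Int) 2 = 0) = false := by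
        rw [hmod, hp]; decide
      rw [hd, if_neg Bool.false_ne_true]
      omega
    · have hne : ¬ PySem.Int.mod ((m : Nat) : Int) 2 = 0 := by rw [hmod]; omega
      rw [decide_eq_true hne, if_pos rfl]
      omega

-- B's pair walk in closed form over the remaining n = (N - i).toNat indices:
-- subtract their sum, add one per full pair (n / 2 of them).
theorem buyPairs_closed (N : Int) (A : List Int) :
    ∀ (n : Nat) (i x : Int), (N - i).toNat = n →
      buyPairs N A i x
        = x - ((List.range n).map (fun (k : Nat) => PySem.List.pyGetD A (i + (k : Int)) 0)).sum
            + ((n / 2 : Nat) : Int) := by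
  intro n
  induction n using Nat.strong_induction_on with
  | _ n ih =>
    intro i x hn
    rw [buyPairs]
    by_cases h1 : i + 1 < N
    · rw [if_pos h1]
      obtain ⟨m, hm⟩ : ∃ m, n = m + 2 := ⟨n - 2, by omega⟩
      have hrec := ih m (by omega) (i + 2)
        (x - (PySem.List.pyGetD A i 0 + PySem.List.pyGetD A (i + 1) 0 - 1)) (by omega)
      rw [hrec, hm]
      have hsplit :
          ((List.range (m + 2)).map (fun (k : Nat) => PySem.List.pyGetD A (i + (k : Int)) 0)).sum
            = PySem.List.pyGetD A i 0 + PySem.List.pyGetD A (i + 1) 0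
              + ((List.range m).map (fun (k : Nat) => PySem.List.pyGetD A (i + 2 + (k : Int)) 0)).sum := by
        rw [Nat.add_comm m 2, List.range_add, List.map_append, List.sum_append, List.map_map]
        have h01 : ((List.range 2).map (fun (k : Nat) => PySem.List.pyGetD A (i + (k : Int)) 0)).sum
            = PySem.List.pyGetD A i 0 + PySem.List.pyGetD A (i + 1) 0 := by
          norm_num [List.range_succ]
        have hmap : (List.range m).map
              ((fun k : Nat => PySem.List.pyGetD A (i + (k : Int)) 0) ∘ (fun k => 2 + k))
            = (List.range m).map (fun (k : Nat) => PySem.List.pyGetD A (i + 2 + (k : Int)) 0) := by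
          apply List.map_congr_left
          intro k _
          simp only [Function.comp]
          congr 1
          push_cast
          ring
        rw [h01, hmap]
      rw [hsplit]
      have : (m + 2) / 2 = m / 2 + 1 := by omega
      rw [this]
      push_cast
      ring
    · rw [if_neg h1]
      by_cases h2 : i < N
      · rw [if_pos h2]
        have hn1 : n = 1 := by omega
        subst hn1
        simp
      · rw [if_neg h2]
        have hn0 : n = 0 := by omega
        subst hn0
        simp

-- ===== VERDICT (by name: the statement is the Claim_ definition above) =====
theorem buy_product_spec : Claim_equal_buy_product := by
  intro N X A _ _
  unfold Spec_buy_product buy_product buy_product_alt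
  rw [PySem.List.pyRange_one, foldA_closed,
      buyPairs_closed N A N.toNat 0 X (by omega), List.countP_map, List.map_map]
  have hcnt : (List.range (N - 0).toNat).countP
      ((fun i => decide (¬ PySem.Int.mod i 2 = 0)) ∘ (fun k => (0 : Int) + ↑k))
      = (N - 0).toNat / 2 := by
    have := countOdd_range (N - 0).toNat
    simpa [Function.comp] using this
  rw [hcnt]
  have hN : (N - 0).toNat = N.toNat := by omega
  rw [hN]
  simp only [Function.comp_def]
  simp
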